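-- pv_equiv track=rewrite | github.com/AndreaFedeli99/Master_Course | Advanced_Programming/Es2/AP_Es_2.4.py | isPractical
-- ===== SOURCE A (Python) =====
-- from itertools import chain, cycle, accumulate, combinations
--
-- def factors(n):
--     def prime_powers(n):
--         for c in accumulate(chain([2, 1, 2], cycle([2,4]))):
--             if c*c > n: break
--             if n%c: continue
--             d,p = (), c
--             while not n%c:
--                 n,p,d = n//c, p*c, d + (p,)
--             yield(d)
--         if n > 1: yield((n,))
--
--     r = [1]
--     for e in prime_powers(n):
--         r += [a*b for a in r for b in e]
--     return r[:-1]
--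
-- def powerset(s):
--     return chain.from_iterable(combinations(s, r) for r in range(1, len(s)+1))
--
-- def isPractical(x: int) -> bool:
--     if x == 1:
--         return True
--     if x % 2:
--         return False
--     mult_4_or_6 = (x % 4 == 0) or (x % 6 == 0)
--     if x > 2 and not mult_4_or_6:
--         return False
--
--     f = sorted(factors(x), reverse=True)
--     if sum(f) < x - 1:
--         return False
--     ps = powerset(f)
--
--     found = set()
--     for nps in ps:
--         if len(found) < x - 1:
--             y = sum(nps)
--             if 1 <= y < x:
--                 found.add(y)
--         else:
--             break
--     return len(found) == x - 1
-- ===== SOURCE B (Python) =====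
-- def isPractical(x: int) -> bool:
--     if x < 1:
--         return False
--     if x == 1:
--         return True
--     if x % 2:
--         return False
--     if x > 2 and not (x % 4 == 0 or x % 6 == 0):
--         return False
--     # prime-power chains by plain trial division (no wheel, no generators)
--     n = x
--     chains = []
--     c = 2
--     while c * c <= n:
--         k = 0
--         while n % c == 0:
--             n //= c
--             k += 1
--         if k:
--             chains.append([c ** (e + 1) for e in range(k)])
--         c += 1
--     if n > 1:
--         chains.append([n])
--     # all divisors, multiplying in each prime-power chain
--     divs = [1]
--     for ch in chains:
--         divs = [d * q for q in [1] + ch for d in divs]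
--     divs.pop()  # the fold puts x itself last; keep the proper divisors
--     if sum(divs) < x - 1:
--         return False
--     # bitset subset-sum sweep: bit y of reach = "y is a subset sum"
--     reach = 1
--     for d in divs:
--         reach |= reach << d
--     target = (1 << (x - 1)) - 1
--     return (reach >> 1) & target == target
-- ===== Notes on version B (the rewrite author's own statement) =====
-- stated objective: alternative
-- what changed: B replaces A's wheel-generator prime factorization (accumulate/chain/cycle candidate stream yielding prime-power tuples) by plain trial division with exponent counting, and replaces A's powerset enumeration of divisor subsets into a hash set (with early break) by a big-integer bitset subset-sum sweep checked against a full interval mask.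
import Mathlib
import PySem

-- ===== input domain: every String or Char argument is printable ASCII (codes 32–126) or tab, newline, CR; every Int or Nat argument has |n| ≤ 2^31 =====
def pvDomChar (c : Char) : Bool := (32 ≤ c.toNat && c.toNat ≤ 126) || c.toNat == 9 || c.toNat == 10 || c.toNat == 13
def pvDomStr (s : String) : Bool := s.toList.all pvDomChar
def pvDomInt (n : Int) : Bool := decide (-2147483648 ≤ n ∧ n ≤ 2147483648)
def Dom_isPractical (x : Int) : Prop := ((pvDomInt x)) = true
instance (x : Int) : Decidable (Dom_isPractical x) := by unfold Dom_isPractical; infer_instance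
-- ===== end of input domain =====

-- B replaces A's wheel-generator prime factorization by plain trial division with
-- exponent counting, and A's powerset enumeration of divisor subset sums by a
-- bitset subset-sum sweep; equivalence is proved on all ints.
-- (Every while-loop is ported by structural recursion on an explicit fuel that is
-- provably sufficient — a totality guard only; the loop bodies are transliterations.)

-- ===== PORT A =====
-- Wheel candidate stream: `accumulate(chain([2, 1, 2], cycle([2, 4])))` = 2,3,5,7,11,13,17,…
-- encoded exactly as "first value 2, then increments 1,2,2, then alternately 4,2".
def wheelInc (k : Nat) : Int :=
  if k = 0 then 1 else if k ≤ 2 then 2 else if k % 2 = 1 then 4 else 2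

def wheelCand : Nat → Int
  | 0 => 2
  | k + 1 => wheelCand k + wheelInc k

-- inner `while not n%c: n, p, d = n//c, p*c, d + (p,)`  (d collects the OLD p each step).
-- The 1 ≤ n, 2 ≤ c conjuncts and the fuel are totality guards only: they hold (and the
-- fuel suffices) on every call the ports make.
def divideOut (fuel : Nat) (c n p : Int) (d : List Int) : Int × List Int :=
  match fuel with
  | 0 => (n, d)
  | fuel + 1 =>
    if PySem.Int.mod n c = 0 ∧ 1 ≤ n ∧ 2 ≤ c then
      divideOut fuel c (PySem.Int.floordiv n c) (p * c) (d ++ [p])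
    else (n, d)

-- `for c in wheel: if c*c > n: break; if n%c: continue; …yield d…`; returns (yielded tuples, final n)
def ppLoop (fuel : Nat) (k : Nat) (n : Int) (acc : List (List Int)) : List (List Int) × Int :=
  match fuel with
  | 0 => (acc, n)
  | fuel + 1 =>
    let c := wheelCand k
    if c * c ≤ n then
      if PySem.Int.mod n c = 0 then
        let r := divideOut n.toNat c n c []
        ppLoop fuel (k + 1) r.1 (acc ++ [r.2])
      else ppLoop fuel (k + 1) n acc
    else (acc, n)

def primePowersPort (n : Int) : List (List Int) :=
  let r := ppLoop n.toNat 0 n []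
  if 1 < r.2 then r.1 ++ [[r.2]] else r.1

-- `r += [a*b for a in r for b in e]` (a outer, b inner)
def stepDivA (r e : List Int) : List Int :=
  r ++ r.flatMap (fun a => e.map (fun b => a * b))

-- `r = [1]; for e in prime_powers(n): r += …; return r[:-1]`
-- (`r` is never empty, so `r[:-1]` is dropLast — exact here)
def factorsPort (n : Int) : List Int :=
  ((primePowersPort n).foldl stepDivA [1]).dropLast

-- one iteration body of `for nps in ps: if len(found) < x-1: y=sum(nps); if 1<=y<x: found.add(y)`
-- (`found` is a Python set consumed only through add/len — iteration order never used — so it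
-- is modelled by Std.HashSet, exact for membership and size)
def stepA (x : Int) (found : Std.HashSet Int) (y : Int) : Std.HashSet Int :=
  if (found.size : Int) < x - 1 then (if 1 ≤ y ∧ y < x then found.insert y else found) else found

-- `ps = chain.from_iterable(combinations(s, r) for r in range(1, len(s)+1))` is a LAZY
-- generator and the consuming loop BREAKs once len(found) = x-1; the port fuses the
-- generator with the loop (same subsets, same order, and the break-condition check
-- before each generated subset), since materialising the powerset would not terminate
-- in reasonable time where CPython's break stops the generation.
def combFold (x : Int) (s : List Int) (r : Nat) (pre : Int) (found : Std.HashSet Int) :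
    Std.HashSet Int :=
  if ¬ ((found.size : Int) < x - 1) then found   -- the loop's break
  else match r, s with
    | 0, _ => stepA x found pre
    | _ + 1, [] => found
    | r + 1, a :: t => combFold x t (r + 1) pre (combFold x t r (pre + a) found)
termination_by structural s

def isPractical (x : Int) : Bool :=
  if x == 1 then true
  else if PySem.Int.mod x 2 ≠ 0 then false
  else
    let mult46 : Bool := PySem.Int.mod x 4 == 0 || PySem.Int.mod x 6 == 0
    if 2 < x ∧ ¬ (mult46 = true) then false
    else
      let f := PySem.List.sorted (factorsPort x) (fun a => a) true
      if f.sum < x - 1 then false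
      else
        let found := (PySem.List.pyRange 1 ((f.length : Int) + 1)).foldl
          (fun fd r => combFold x f r.toNat 0 fd) ∅
        (found.size : Int) == x - 1

-- ===== PORT B =====
-- inner `k = 0; while n % c == 0: n //= c; k += 1` of Source B (exponent counting; the
-- 1 ≤ n, 2 ≤ c conjuncts and the fuel are totality guards exactly as in divideOut)
def countDiv (fuel : Nat) (c n : Int) (k : Nat) : Int × Nat :=
  match fuel with
  | 0 => (n, k)
  | fuel + 1 =>
    if PySem.Int.mod n c = 0 ∧ 1 ≤ n ∧ 2 ≤ c then
      countDiv fuel c (PySem.Int.floordiv n c) (k + 1)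
    else (n, k)

-- outer `while c * c <= n: k = …; if k: chains.append([c**(e+1) for e in range(k)]); c += 1`
def tdLoop (fuel : Nat) (c n : Int) (acc : List (List Int)) : List (List Int) × Int :=
  match fuel with
  | 0 => (acc, n)
  | fuel + 1 =>
    if c * c ≤ n then
      let r := countDiv n.toNat c n 0
      let acc' := if r.2 ≠ 0 then acc ++ [(List.range r.2).map (fun e => c ^ (e + 1))] else acc
      tdLoop fuel (c + 1) r.1 acc'
    else (acc, n)

-- `divs = [d * q for q in [1] + ch for d in divs]` (q outer, d inner)
def stepDivB (divs ch : List Int) : List Int :=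
  ([1] ++ ch).flatMap (fun q => divs.map (fun d => d * q))

-- the trial-division factorization plus the divisor fold and `divs.pop()`
def factorsB (x : Int) : List Int :=
  let r := tdLoop x.toNat 2 x []
  let chains := if 1 < r.2 then r.1 ++ [[r.2]] else r.1
  (chains.foldl stepDivB [1]).dropLast

def isPractical_alt (x : Int) : Bool :=
  if x < 1 then false
  else if x == 1 then true
  else if PySem.Int.mod x 2 ≠ 0 then false
  else if 2 < x ∧ ¬ ((PySem.Int.mod x 4 == 0 || PySem.Int.mod x 6 == 0) = true) then false
  else
    let f := factorsB x
    if f.sum < x - 1 then false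
    else
      let reach := f.foldl (fun m d => m ||| (m <<< d.toNat)) (1 : Nat)
      let target : Nat := (1 <<< (x - 1).toNat) - 1
      ((reach >>> 1) &&& target) == target

-- ===== PRECONDITION & SPEC =====
def Spec_isPractical (x : Int) (out : Bool) : Prop := out = isPractical_alt x
instance (x : Int) (out : Bool) : Decidable (Spec_isPractical x out) := by unfold Spec_isPractical; infer_instance

-- ===== CLAIM (what is proved, stated in full; the proofs are below) =====
def Claim_equal_isPractical : Prop := ∀ (x : Int), Dom_isPractical x → Spec_isPractical x (isPractical x)

-- ===== LEMMAS AND PROOFS =====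

theorem wheelInc_pos (k : Nat) : 1 ≤ wheelInc k := by
  unfold wheelInc; split_ifs <;> omega

theorem wheelCand_ge_two (k : Nat) : 2 ≤ wheelCand k := by
  induction k with
  | zero => simp [wheelCand]
  | succ k ih => have := wheelInc_pos k; simp [wheelCand]; omega

theorem wheelCand_lt_succ (k : Nat) : wheelCand k < wheelCand (k + 1) := by
  have := wheelInc_pos k; simp [wheelCand]; omega

theorem pv_div_lt {n c : Int} (hdvd : PySem.Int.mod n c = 0) (hn : 1 ≤ n) (hc : 2 ≤ c) :
    (PySem.Int.floordiv n c).toNat < n.toNat := by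
  rw [PySem.Int.floordiv_eq_ediv_of_pos (by omega)]
  rw [PySem.Int.mod_eq_zero_iff_dvd] at hdvd
  obtain ⟨q, hq⟩ := hdvd
  subst hq
  have hq1 : 1 ≤ q := by nlinarith
  have h1 : c * q / c = q := by
    rw [mul_comm, Int.mul_ediv_cancel _ (by omega)]
  rw [h1]
  have : q < c * q := by nlinarith
  omega

theorem pv_div_lt' {n c : Int} (hdvd : PySem.Int.mod n c = 0) (hn : 1 ≤ n) (hc : 2 ≤ c) :
    PySem.Int.floordiv n c < n := by
  rw [PySem.Int.floordiv_eq_ediv_of_pos (by omega)]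
  rw [PySem.Int.mod_eq_zero_iff_dvd] at hdvd
  obtain ⟨q, hq⟩ := hdvd
  subst hq
  have hq1 : 1 ≤ q := by nlinarith
  have h1 : c * q / c = q := by
    rw [mul_comm, Int.mul_ediv_cancel _ (by omega)]
  rw [h1]; nlinarith

theorem pv_floordiv_pos {n c : Int} (hdvd : PySem.Int.mod n c = 0) (hn : 1 ≤ n) (hc : 2 ≤ c) :
    1 ≤ PySem.Int.floordiv n c := by
  rw [PySem.Int.floordiv_eq_ediv_of_pos (by omega)]
  rw [PySem.Int.mod_eq_zero_iff_dvd] at hdvd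
  obtain ⟨q, rfl⟩ := hdvd
  have hq1 : 1 ≤ q := by nlinarith
  rw [Int.mul_ediv_cancel_left _ (by omega)]
  exact hq1

theorem pv_floordiv_dvd {n c : Int} (hdvd : PySem.Int.mod n c = 0) (hn : 1 ≤ n) (hc : 2 ≤ c) :
    PySem.Int.floordiv n c ∣ n := by
  rw [PySem.Int.floordiv_eq_ediv_of_pos (by omega)]
  rw [PySem.Int.mod_eq_zero_iff_dvd] at hdvd
  obtain ⟨q, rfl⟩ := hdvd
  rw [Int.mul_ediv_cancel_left _ (by omega)]
  exact dvd_mul_left q c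

-- ---------- A-side: positivity of the divisor list ----------

theorem divideOut_fst_le (fuel : Nat) (c : Int) : ∀ (n p : Int) (d : List Int),
    (divideOut fuel c n p d).1 ≤ n := by
  induction fuel with
  | zero => intro n p d; simp [divideOut]
  | succ fuel ih =>
    intro n p d
    simp only [divideOut]
    split_ifs with h
    · have h1 := ih (PySem.Int.floordiv n c) (p * c) (d ++ [p])
      have h2 := pv_div_lt' h.1 h.2.1 h.2.2
      omega
    · simp

theorem divideOut_mem_pos (fuel : Nat) (c : Int) : ∀ (n p : Int) (d : List Int),
    1 ≤ p → (∀ a ∈ d, 1 ≤ a) → ∀ a ∈ (divideOut fuel c n p d).2, 1 ≤ a := by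
  induction fuel with
  | zero => intro n p d _ hd; simpa [divideOut] using hd
  | succ fuel ih =>
    intro n p d hp hd
    simp only [divideOut]
    split_ifs with h
    · exact ih _ _ _ (by nlinarith [h.2.2]) (by
        intro a ha
        rcases List.mem_append.1 ha with ha | ha
        · exact hd a ha
        · simp at ha; omega)
    · simpa using hd

theorem ppLoop_mem_pos (fuel : Nat) : ∀ (k : Nat) (n : Int) (acc : List (List Int)),
    (∀ e ∈ acc, ∀ a ∈ e, 1 ≤ a) → ∀ e ∈ (ppLoop fuel k n acc).1, ∀ a ∈ e, 1 ≤ a := by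
  induction fuel with
  | zero => intro k n acc hacc; simpa [ppLoop] using hacc
  | succ fuel ih =>
    intro k n acc hacc
    simp only [ppLoop]
    split_ifs with hle hdv
    · refine ih _ _ _ ?_
      intro e he
      rcases List.mem_append.1 he with he | he
      · exact hacc e he
      · simp at he
        subst he
        exact divideOut_mem_pos _ _ _ _ _ (by have := wheelCand_ge_two k; omega) (by simp)
    · exact ih _ _ _ hacc
    · simpa using hacc

theorem primePowersPort_pos (x : Int) : ∀ e ∈ primePowersPort x, ∀ a ∈ e, 1 ≤ a := by
  unfold primePowersPort
  set r := ppLoop x.toNat 0 x [] with hr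
  by_cases h1 : 1 < r.2
  · simp only [if_pos h1]
    intro e he
    rcases List.mem_append.1 he with he | he
    · exact ppLoop_mem_pos _ _ _ _ (by simp) e he
    · simp at he; subst he; simp; omega
  · simp only [if_neg h1]
    exact ppLoop_mem_pos _ _ _ _ (by simp)

theorem fold_divisors_pos (ts : List (List Int)) (r : List Int)
    (hr : ∀ a ∈ r, 1 ≤ a) (hts : ∀ e ∈ ts, ∀ b ∈ e, 1 ≤ b) :
    ∀ a ∈ ts.foldl stepDivA r, 1 ≤ a := by
  induction ts generalizing r with
  | nil => simpa using hr
  | cons e ts ih =>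
    simp only [List.foldl_cons]
    refine ih _ ?_ (fun e' he' => hts e' (List.mem_cons_of_mem _ he'))
    intro a ha
    unfold stepDivA at ha
    rcases List.mem_append.1 ha with ha | ha
    · exact hr a ha
    · simp only [List.mem_flatMap, List.mem_map] at ha
      obtain ⟨u, hu, b, hb, rfl⟩ := ha
      have := hr u hu
      have := hts e (List.mem_cons_self) b hb
      nlinarith

theorem factorsPort_pos (x : Int) : ∀ d ∈ factorsPort x, 1 ≤ d := by
  intro d hd
  unfold factorsPort at hd
  have hsub := (List.dropLast_sublist _).mem hd
  exact fold_divisors_pos _ [1] (by simp) (primePowersPort_pos x) d hsub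

-- ---------- wheel closed form and gap structure ----------

theorem wheelCand_cf : ∀ k : Nat, 2 ≤ k →
    wheelCand k = if k % 2 = 0 then 3 * (k : Int) - 1 else 3 * (k : Int) - 2 := by
  intro k hk
  induction k with
  | zero => omega
  | succ k ih =>
    by_cases h2 : 2 ≤ k
    · have hcf := ih h2
      simp only [wheelCand, hcf, wheelInc]
      split_ifs <;> push_cast <;> omega
    · have hk1 : k = 1 := by omega
      subst hk1
      norm_num [wheelCand, wheelInc]

theorem wheel_gap (k : Nat) (m : Int) (h1 : wheelCand k < m) (h2 : m < wheelCand (k + 1)) :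
    ((2 : Int) ∣ m ∧ 2 < wheelCand k) ∨ ((3 : Int) ∣ m ∧ 3 < wheelCand k) := by
  match k with
  | 0 =>
    exfalso
    have e0 : wheelCand 0 = 2 := rfl
    have e1 : wheelCand (0 + 1) = 3 := by norm_num [wheelCand, wheelInc]
    omega
  | 1 =>
    have e1 : wheelCand 1 = 3 := by norm_num [wheelCand, wheelInc]
    have e2 : wheelCand (1 + 1) = 5 := by norm_num [wheelCand, wheelInc]
    left
    omega
  | (k + 2) =>
    have c1 := wheelCand_cf (k + 2) (by omega)
    have c2 := wheelCand_cf (k + 3) (by omega)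
    rcases Nat.even_or_odd k with ⟨t, ht⟩ | ⟨t, ht⟩
    · rw [if_pos (by omega)] at c1
      rw [if_neg (by omega)] at c2
      rw [c1] at h1 ⊢
      rw [c2] at h2
      omega
    · rw [if_neg (by omega)] at c1
      rw [if_pos (by omega)] at c2
      rw [c1] at h1 ⊢
      rw [c2] at h2
      omega

-- ---------- countDiv facts and the divideOut / countDiv bridge ----------

theorem countDiv_fst_le (fuel : Nat) (c : Int) : ∀ (n : Int) (k : Nat),
    (countDiv fuel c n k).1 ≤ n := by
  induction fuel with
  | zero => intro n k; simp [countDiv]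
  | succ fuel ih =>
    intro n k
    simp only [countDiv]
    split_ifs with h
    · have h1 := ih (PySem.Int.floordiv n c) (k + 1)
      have h2 := pv_div_lt' h.1 h.2.1 h.2.2
      omega
    · simp

theorem countDiv_shift (fuel : Nat) (c : Int) : ∀ (n : Int) (k : Nat),
    countDiv fuel c n k = ((countDiv fuel c n 0).1, (countDiv fuel c n 0).2 + k) := by
  induction fuel with
  | zero => intro n k; simp [countDiv]
  | succ fuel ih =>
    intro n k
    simp only [countDiv]
    split_ifs with h
    · rw [ih (PySem.Int.floordiv n c) (k + 1), ih (PySem.Int.floordiv n c) 1]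
      simp [Prod.ext_iff]
      omega
    · simp

theorem countDiv_fst_pos (fuel : Nat) (c : Int) : ∀ (n : Int) (k : Nat), 1 ≤ n →
    1 ≤ (countDiv fuel c n k).1 := by
  induction fuel with
  | zero => intro n k hn; simpa [countDiv] using hn
  | succ fuel ih =>
    intro n k hn
    simp only [countDiv]
    split_ifs with h
    · exact ih _ _ (pv_floordiv_pos h.1 h.2.1 h.2.2)
    · simpa using hn

theorem countDiv_fst_dvd (fuel : Nat) (c : Int) : ∀ (n : Int) (k : Nat),
    (countDiv fuel c n k).1 ∣ n := by
  induction fuel with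
  | zero => intro n k; simp [countDiv]
  | succ fuel ih =>
    intro n k
    simp only [countDiv]
    split_ifs with h
    · exact dvd_trans (ih _ _) (pv_floordiv_dvd h.1 h.2.1 h.2.2)
    · simp

theorem countDiv_fst_not_dvd (fuel : Nat) (c : Int) : ∀ (n : Int) (k : Nat),
    n.toNat ≤ fuel → 1 ≤ n → 2 ≤ c → ¬ c ∣ (countDiv fuel c n k).1 := by
  induction fuel with
  | zero => intro n k hf hn _; omega
  | succ fuel ih =>
    intro n k hf hn hc
    simp only [countDiv]
    split_ifs with h
    · have hlt := pv_div_lt h.1 h.2.1 h.2.2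
      exact ih _ _ (by omega) (pv_floordiv_pos h.1 h.2.1 h.2.2) hc
    · intro hd
      exact h ⟨(PySem.Int.mod_eq_zero_iff_dvd n c).mpr hd, hn, hc⟩

theorem countDiv_snd_pos {c n : Int} (fuel : Nat)
    (hg : PySem.Int.mod n c = 0 ∧ 1 ≤ n ∧ 2 ≤ c) :
    (countDiv (fuel + 1) c n 0).2 ≠ 0 := by
  simp only [countDiv, if_pos hg]
  rw [countDiv_shift]
  omega

theorem countDiv_nodvd {c n : Int} (fuel : Nat) (h : PySem.Int.mod n c ≠ 0) (k : Nat) :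
    countDiv fuel c n k = (n, k) := by
  cases fuel with
  | zero => rfl
  | succ fuel => simp only [countDiv]; rw [if_neg (by rintro ⟨hm, _, _⟩; exact h hm)]

theorem divideOut_eq_countDiv (fuel : Nat) (c : Int) : ∀ (n p : Int) (d : List Int),
    divideOut fuel c n p d =
      ((countDiv fuel c n 0).1,
        d ++ (List.range (countDiv fuel c n 0).2).map (fun e => p * c ^ e)) := by
  induction fuel with
  | zero => intro n p d; simp [divideOut, countDiv]
  | succ fuel ih =>
    intro n p d
    simp only [divideOut, countDiv]
    split_ifs with h
    · rw [ih, countDiv_shift fuel c (PySem.Int.floordiv n c) 1]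
      refine Prod.ext rfl ?_
      simp only [List.range_succ_eq_map, List.map_cons, List.map_map]
      rw [List.append_assoc]
      congr 1
      simp only [pow_zero, mul_one, List.cons_append, List.nil_append]
      congr 1
      refine List.map_congr_left ?_
      intro e _
      simp only [Function.comp_apply, pow_succ]
      ring
    · simp

-- ---------- fuel irrelevance and exit lemmas for the two outer loops ----------

theorem ppLoop_exit {k : Nat} {n : Int} (h : ¬ wheelCand k * wheelCand k ≤ n)
    (fuel : Nat) (acc : List (List Int)) : ppLoop fuel k n acc = (acc, n) := by
  cases fuel with
  | zero => rfl
  | succ fuel => simp only [ppLoop]; rw [if_neg h]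

theorem tdLoop_exit {c n : Int} (h : ¬ c * c ≤ n)
    (fuel : Nat) (acc : List (List Int)) : tdLoop fuel c n acc = (acc, n) := by
  cases fuel with
  | zero => rfl
  | succ fuel => simp only [tdLoop]; rw [if_neg h]

theorem tdLoop_irrel : ∀ (M : Nat) (c n : Int) (acc : List (List Int)) (f₁ f₂ : Nat),
    2 ≤ c → (n + 2 - c).toNat ≤ M → (n + 2 - c).toNat ≤ f₁ →
    (n + 2 - c).toNat ≤ f₂ → tdLoop f₁ c n acc = tdLoop f₂ c n acc := by
  intro M
  induction M with
  | zero =>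
    intro c n acc f₁ f₂ hc hM _ _
    have hn2 : n ≤ c - 2 := by omega
    have hex : ¬ c * c ≤ n := by nlinarith
    rw [tdLoop_exit hex, tdLoop_exit hex]
  | succ M ihM =>
    intro c n acc f₁ f₂ hc hM h1 h2
    by_cases hle : c * c ≤ n
    · have hcn : c ≤ n := le_trans (by nlinarith) hle
      obtain ⟨g₁, rfl⟩ : ∃ g, f₁ = g + 1 := ⟨f₁ - 1, by omega⟩
      obtain ⟨g₂, rfl⟩ : ∃ g, f₂ = g + 1 := ⟨f₂ - 1, by omega⟩
      simp only [tdLoop]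
      rw [if_pos hle, if_pos hle]
      have hfle := countDiv_fst_le n.toNat c n 0
      exact ihM _ _ _ _ _ (by omega) (by omega) (by omega) (by omega)
    · rw [tdLoop_exit hle, tdLoop_exit hle]

-- ---------- the trial-division loop visits exactly the wheel's useful candidates ----------

theorem skipEq : ∀ (j : Nat) (c n : Int) (acc : List (List Int)) (f : Nat), 2 ≤ c →
    (∀ m : Int, c ≤ m → m < c + j → ¬ m ∣ n) →
    tdLoop (f + j) c n acc = tdLoop f (c + j) n acc := by
  intro j
  induction j with
  | zero => intro c n acc f _ _; norm_num
  | succ j ih =>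
    intro c n acc f hc hnd
    have hstep : tdLoop (f + j + 1) c n acc = tdLoop (f + j) (c + 1) n acc := by
      by_cases hle : c * c ≤ n
      · simp only [tdLoop]
        rw [if_pos hle]
        have hnd0 : ¬ ((c : Int) ∣ n) := hnd c le_rfl (by push_cast; omega)
        have hcd : countDiv n.toNat c n 0 = (n, 0) := by
          refine countDiv_nodvd _ ?_ 0
          intro hm
          exact hnd0 ((PySem.Int.mod_eq_zero_iff_dvd n c).mp hm)
        simp [hcd]
      · rw [tdLoop_exit hle, tdLoop_exit]
        intro hcon
        have : c * c ≤ (c + 1) * (c + 1) := by nlinarith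
        omega
    have harr : f + (j + 1 : Nat) = f + j + 1 := by omega
    rw [harr, hstep, ih (c + 1) n acc f (by omega)
      (by intro m hm1 hm2; exact hnd m (by omega) (by push_cast at hm2 ⊢; omega))]
    congr 1
    push_cast
    ring

theorem tdLoop_eq_ppLoop : ∀ (M : Nat) (k : Nat) (n : Int) (acc : List (List Int)),
    (n + 2 - wheelCand k).toNat ≤ M → 1 ≤ n →
    (∀ m : Int, 2 ≤ m → m < wheelCand k → ¬ m ∣ n) →
    ∀ f₁ f₂ : Nat, (n + 2 - wheelCand k).toNat ≤ f₁ → (n + 2 - wheelCand k).toNat ≤ f₂ →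
    tdLoop f₂ (wheelCand k) n acc = ppLoop f₁ k n acc := by
  intro M
  induction M with
  | zero =>
    intro k n acc hM _ _ f₁ f₂ _ _
    have hc2 := wheelCand_ge_two k
    have hn2 : n ≤ wheelCand k - 2 := by omega
    have hex : ¬ wheelCand k * wheelCand k ≤ n := by nlinarith
    rw [tdLoop_exit hex, ppLoop_exit hex]
  | succ M ihM =>
    intro k n acc hM h1 hInv f₁ f₂ hf1 hf2
    have hc2 := wheelCand_ge_two k
    have hmono := wheelCand_lt_succ k
    by_cases hle : wheelCand k * wheelCand k ≤ n
    · have hcn : wheelCand k ≤ n := le_trans (by nlinarith) hle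
      obtain ⟨g₁, rfl⟩ : ∃ g, f₁ = g + 1 := ⟨f₁ - 1, by omega⟩
      obtain ⟨g₂, rfl⟩ : ∃ g, f₂ = g + 1 := ⟨f₂ - 1, by omega⟩
      by_cases hdv : PySem.Int.mod n (wheelCand k) = 0
      · -- dividing step on both sides
        have hg : PySem.Int.mod n (wheelCand k) = 0 ∧ 1 ≤ n ∧ 2 ≤ wheelCand k := ⟨hdv, h1, hc2⟩
        set r := divideOut n.toNat (wheelCand k) n (wheelCand k) [] with hrdef
        have hr : r = ((countDiv n.toNat (wheelCand k) n 0).1,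
            (List.range (countDiv n.toNat (wheelCand k) n 0).2).map
              (fun e => wheelCand k * wheelCand k ^ e)) := by
          rw [hrdef, divideOut_eq_countDiv]
          simp
        have hfle : r.1 ≤ n := by rw [hrdef]; exact divideOut_fst_le _ _ _ _ _
        have hpos : 1 ≤ r.1 := by rw [hr]; exact countDiv_fst_pos _ _ _ _ h1
        have hdvdn : r.1 ∣ n := by rw [hr]; exact countDiv_fst_dvd _ _ _ _
        obtain ⟨ft, hft⟩ : ∃ ft, n.toNat = ft + 1 := ⟨n.toNat - 1, by omega⟩
        have hKsnd : (countDiv n.toNat (wheelCand k) n 0).2 ≠ 0 := by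
          rw [hft]; exact countDiv_snd_pos ft hg
        have hA : ppLoop (g₁ + 1) k n acc = ppLoop g₁ (k + 1) r.1 (acc ++ [r.2]) := by
          simp only [ppLoop]
          rw [if_pos hle, if_pos hdv]
        have hchain : (List.range (countDiv n.toNat (wheelCand k) n 0).2).map
            (fun e => wheelCand k ^ (e + 1)) = r.2 := by
          rw [hr]
          refine List.map_congr_left ?_
          intro e _
          rw [pow_succ]
          ring
        have hB : tdLoop (g₂ + 1) (wheelCand k) n acc =
            tdLoop g₂ (wheelCand k + 1) r.1 (acc ++ [r.2]) := by
          simp only [tdLoop]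
          rw [if_pos hle]
          simp only [ne_eq, hKsnd, not_false_iff, if_true]
          rw [hchain]
          congr 1
          rw [hr]
        -- invariant for the next wheel position
        have hnotdvd : ∀ m : Int, wheelCand k + 1 ≤ m → m < wheelCand (k + 1) → ¬ m ∣ r.1 := by
          intro m hm1 hm2 hmd
          rcases wheel_gap k m (by omega) hm2 with ⟨h2d, h2lt⟩ | ⟨h3d, h3lt⟩
          · exact hInv 2 (by omega) h2lt (dvd_trans h2d (dvd_trans hmd hdvdn))
          · exact hInv 3 (by omega) h3lt (dvd_trans h3d (dvd_trans hmd hdvdn))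
        have hInv' : ∀ m : Int, 2 ≤ m → m < wheelCand (k + 1) → ¬ m ∣ r.1 := by
          intro m hm2 hmlt hmd
          rcases lt_trichotomy m (wheelCand k) with hmc | hmc | hmc
          · exact hInv m hm2 hmc (dvd_trans hmd hdvdn)
          · rw [hmc] at hmd
            exact (by rw [hr]
                      exact countDiv_fst_not_dvd n.toNat (wheelCand k) n 0 le_rfl h1 hc2 :
              ¬ wheelCand k ∣ r.1) hmd
          · exact hnotdvd m (by omega) hmlt hmd
        -- fuel bookkeeping: skip the wheel-gap candidates, then recurse
        set j := (wheelCand (k + 1) - (wheelCand k + 1)).toNat with hj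
        set F := (r.1 + 2 - wheelCand (k + 1)).toNat with hF
        have hB2 : tdLoop g₂ (wheelCand k + 1) r.1 (acc ++ [r.2]) =
            tdLoop (F + j) (wheelCand k + 1) r.1 (acc ++ [r.2]) := by
          refine tdLoop_irrel (n + 1 - wheelCand k).toNat _ _ _ _ _ (by omega) (by omega)
            (by omega) (by omega)
        have hB3 : tdLoop (F + j) (wheelCand k + 1) r.1 (acc ++ [r.2]) =
            tdLoop F (wheelCand k + 1 + j) r.1 (acc ++ [r.2]) :=
          skipEq j _ _ _ _ (by omega) (by intro m hm1 hm2; exact hnotdvd m hm1 (by omega))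
        have hcast : wheelCand k + 1 + (j : Int) = wheelCand (k + 1) := by omega
        rw [hA, hB, hB2, hB3, hcast]
        exact ihM (k + 1) r.1 (acc ++ [r.2]) (by omega) hpos hInv' g₁ F (by omega) (by omega)
      · -- non-dividing step on both sides
        have hA : ppLoop (g₁ + 1) k n acc = ppLoop g₁ (k + 1) n acc := by
          simp only [ppLoop]
          rw [if_pos hle, if_neg hdv]
        have hcd : countDiv n.toNat (wheelCand k) n 0 = (n, 0) := countDiv_nodvd _ hdv 0
        have hB : tdLoop (g₂ + 1) (wheelCand k) n acc =
            tdLoop g₂ (wheelCand k + 1) n acc := by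
          simp only [tdLoop]
          rw [if_pos hle]
          simp [hcd]
        have hnotdvd : ∀ m : Int, wheelCand k + 1 ≤ m → m < wheelCand (k + 1) → ¬ m ∣ n := by
          intro m hm1 hm2 hmd
          rcases wheel_gap k m (by omega) hm2 with ⟨h2d, h2lt⟩ | ⟨h3d, h3lt⟩
          · exact hInv 2 (by omega) h2lt (dvd_trans h2d hmd)
          · exact hInv 3 (by omega) h3lt (dvd_trans h3d hmd)
        have hInv' : ∀ m : Int, 2 ≤ m → m < wheelCand (k + 1) → ¬ m ∣ n := by
          intro m hm2 hmlt hmd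
          rcases lt_trichotomy m (wheelCand k) with hmc | hmc | hmc
          · exact hInv m hm2 hmc hmd
          · rw [hmc] at hmd
            exact hdv ((PySem.Int.mod_eq_zero_iff_dvd n (wheelCand k)).mpr hmd)
          · exact hnotdvd m (by omega) hmlt hmd
        set j := (wheelCand (k + 1) - (wheelCand k + 1)).toNat with hj
        set F := (n + 2 - wheelCand (k + 1)).toNat with hF
        have hB2 : tdLoop g₂ (wheelCand k + 1) n acc =
            tdLoop (F + j) (wheelCand k + 1) n acc := by
          refine tdLoop_irrel (n + 1 - wheelCand k).toNat _ _ _ _ _ (by omega) (by omega)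
            (by omega) (by omega)
        have hB3 : tdLoop (F + j) (wheelCand k + 1) n acc =
            tdLoop F (wheelCand k + 1 + j) n acc :=
          skipEq j _ _ _ _ (by omega) (by intro m hm1 hm2; exact hnotdvd m hm1 (by omega))
        have hcast : wheelCand k + 1 + (j : Int) = wheelCand (k + 1) := by omega
        rw [hA, hB, hB2, hB3, hcast]
        exact ihM (k + 1) n acc (by omega) h1 hInv' g₁ F (by omega) (by omega)
    · rw [tdLoop_exit hle, ppLoop_exit hle]

-- ---------- the two divisor folds agree up to permutation, with equal last element ----------

theorem tdLoop_chains_ne (fuel : Nat) : ∀ (c n : Int) (acc : List (List Int)),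
    (∀ e ∈ acc, e ≠ []) → ∀ e ∈ (tdLoop fuel c n acc).1, e ≠ [] := by
  induction fuel with
  | zero => intro c n acc hacc; simpa [tdLoop] using hacc
  | succ fuel ih =>
    intro c n acc hacc
    simp only [tdLoop]
    split_ifs with hle hz
    · refine ih _ _ _ ?_
      intro e he
      rcases List.mem_append.1 he with he | he
      · exact hacc e he
      · simp at he
        subst he
        simp only [ne_eq, List.map_eq_nil_iff, List.range_eq_nil]
        omega
    · exact ih _ _ _ hacc
    · simpa using hacc

theorem flatMap_cons_perm (l : List Int) (g : Int → Int) (h : Int → List Int) :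
    (l.flatMap fun b => g b :: h b).Perm (l.map g ++ l.flatMap h) := by
  induction l with
  | nil => simp
  | cons b l ih =>
    simp only [List.flatMap_cons, List.map_cons, List.cons_append]
    refine List.Perm.cons _ ?_
    refine (List.Perm.append_left (h b) ih).trans ?_
    have h2 : ((h b ++ l.map g) ++ l.flatMap h).Perm ((l.map g ++ h b) ++ l.flatMap h) :=
      List.Perm.append_right _ List.perm_append_comm
    simpa [List.append_assoc] using h2

theorem swap_flatMap (l₁ l₂ : List Int) (f : Int → Int → Int) :
    (l₁.flatMap fun a => l₂.map fun b => f a b).Perm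
      (l₂.flatMap fun b => l₁.map fun a => f a b) := by
  induction l₁ with
  | nil => simp
  | cons a l₁ ih =>
    simp only [List.flatMap_cons, List.map_cons]
    have h1 := flatMap_cons_perm l₂ (fun b => f a b) (fun b => l₁.map fun a' => f a' b)
    exact (List.Perm.append_left _ ih).trans h1.symm

theorem flatMap_perm_congr {l : List Int} {u v : Int → List Int}
    (h : ∀ q ∈ l, (u q).Perm (v q)) : (l.flatMap u).Perm (l.flatMap v) := by
  induction l with
  | nil => simp
  | cons q l ih =>
    simp only [List.flatMap_cons]
    exact List.Perm.append (h q List.mem_cons_self)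
      (ih (fun q' hq' => h q' (List.mem_cons_of_mem _ hq')))

theorem stepPerm {r r' : List Int} (h : r.Perm r') (ch : List Int) :
    (stepDivA r ch).Perm (stepDivB r' ch) := by
  unfold stepDivA stepDivB
  have hB : ([1] ++ ch).flatMap (fun q => r'.map (fun d => d * q)) =
      r'.map (fun d => d * 1) ++ ch.flatMap (fun q => r'.map (fun d => d * q)) := by
    simp
  rw [hB, show r'.map (fun d => d * 1) = r' by simp]
  refine List.Perm.append h ?_
  refine (swap_flatMap r ch (fun a b => a * b)).trans ?_
  exact flatMap_perm_congr (fun b _ => h.map _)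

theorem permFold : ∀ (chains : List (List Int)) (r r' : List Int), r.Perm r' →
    (chains.foldl stepDivA r).Perm (chains.foldl stepDivB r') := by
  intro chains
  induction chains with
  | nil => intro r r' h; simpa using h
  | cons ch chains ih =>
    intro r r' h
    simp only [List.foldl_cons]
    exact ih _ _ (stepPerm h ch)

def pvProdLasts (chains : List (List Int)) : Int :=
  (chains.map (fun ch => ch.getLastD 1)).prod

theorem lastA : ∀ (chains : List (List Int)), (∀ ch ∈ chains, ch ≠ []) →
    ∀ (ys : List Int) (m : Int),
      ∃ us, chains.foldl stepDivA (ys ++ [m]) = us ++ [m * pvProdLasts chains] := by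
  intro chains
  induction chains with
  | nil =>
    intro _ ys m
    exact ⟨ys, by simp [pvProdLasts]⟩
  | cons ch chains ih =>
    intro hne ys m
    obtain ⟨l', lc, rfl⟩ : ∃ l' lc, ch = l' ++ [lc] := by
      rcases List.eq_nil_or_concat ch with hnil | ⟨l', a, hc⟩
      · exact absurd hnil (hne ch List.mem_cons_self)
      · exact ⟨l', a, by simpa using hc⟩
    simp only [List.foldl_cons]
    have hshape : stepDivA (ys ++ [m]) (l' ++ [lc]) =
        (ys ++ [m] ++ ys.flatMap (fun a => (l' ++ [lc]).map (fun b => a * b)) ++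
          l'.map (fun b => m * b)) ++ [m * lc] := by
      simp [stepDivA, List.flatMap_append, List.map_append, List.append_assoc]
    rw [hshape]
    obtain ⟨us, hus⟩ := ih (fun e he => hne e (List.mem_cons_of_mem _ he)) _ (m * lc)
    refine ⟨us, ?_⟩
    rw [hus]
    have hpl : pvProdLasts ((l' ++ [lc]) :: chains) = lc * pvProdLasts chains := by
      simp [pvProdLasts]
    rw [hpl, mul_assoc]

theorem lastB : ∀ (chains : List (List Int)), (∀ ch ∈ chains, ch ≠ []) →
    ∀ (ys : List Int) (m : Int),
      ∃ us, chains.foldl stepDivB (ys ++ [m]) = us ++ [m * pvProdLasts chains] := by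
  intro chains
  induction chains with
  | nil =>
    intro _ ys m
    exact ⟨ys, by simp [pvProdLasts]⟩
  | cons ch chains ih =>
    intro hne ys m
    obtain ⟨l', lc, rfl⟩ : ∃ l' lc, ch = l' ++ [lc] := by
      rcases List.eq_nil_or_concat ch with hnil | ⟨l', a, hc⟩
      · exact absurd hnil (hne ch List.mem_cons_self)
      · exact ⟨l', a, by simpa using hc⟩
    simp only [List.foldl_cons]
    have hshape : stepDivB (ys ++ [m]) (l' ++ [lc]) =
        (([1] ++ l').flatMap (fun q => (ys ++ [m]).map (fun d => d * q)) ++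
          ys.map (fun d => d * lc)) ++ [m * lc] := by
      simp [stepDivB, List.flatMap_append, List.map_append, List.append_assoc]
    rw [hshape]
    obtain ⟨us, hus⟩ := ih (fun e he => hne e (List.mem_cons_of_mem _ he)) _ (m * lc)
    refine ⟨us, ?_⟩
    rw [hus]
    have hpl : pvProdLasts ((l' ++ [lc]) :: chains) = lc * pvProdLasts chains := by
      simp [pvProdLasts]
    rw [hpl, mul_assoc]

theorem pv_perm_cancel_last {l₁ l₂ : List Int} {a : Int}
    (h : (l₁ ++ [a]).Perm (l₂ ++ [a])) : l₁.Perm l₂ := by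
  have h1 : (a :: l₁).Perm (a :: l₂) :=
    (List.perm_append_singleton a l₁).symm.trans (h.trans (List.perm_append_singleton a l₂))
  exact (List.perm_cons a).1 h1

theorem factors_perm {x : Int} (hx : 2 ≤ x) : (factorsPort x).Perm (factorsB x) := by
  have hEQ : tdLoop x.toNat 2 x [] = ppLoop x.toNat 0 x [] := by
    have h := tdLoop_eq_ppLoop x.toNat 0 x [] (by
        have : wheelCand 0 = 2 := rfl
        omega) (by omega) (by
        intro m hm hlt hmd
        have : wheelCand 0 = 2 := rfl
        omega) x.toNat x.toNat (by
        have : wheelCand 0 = 2 := rfl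
        omega) (by
        have : wheelCand 0 = 2 := rfl
        omega)
    simpa [show wheelCand 0 = 2 from rfl] using h
  have hne : ∀ e ∈ (if 1 < (tdLoop x.toNat 2 x []).2 then
      (tdLoop x.toNat 2 x []).1 ++ [[(tdLoop x.toNat 2 x []).2]]
      else (tdLoop x.toNat 2 x []).1), e ≠ [] := by
    intro e he
    by_cases h1 : 1 < (tdLoop x.toNat 2 x []).2
    · rw [if_pos h1] at he
      rcases List.mem_append.1 he with he | he
      · exact tdLoop_chains_ne x.toNat 2 x [] (by simp) e he
      · simp at he; subst he; simp
    · rw [if_neg h1] at he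
      exact tdLoop_chains_ne x.toNat 2 x [] (by simp) e he
  unfold factorsPort factorsB primePowersPort
  simp only []
  rw [← hEQ]
  set chains := (if 1 < (tdLoop x.toNat 2 x []).2 then
      (tdLoop x.toNat 2 x []).1 ++ [[(tdLoop x.toNat 2 x []).2]]
      else (tdLoop x.toNat 2 x []).1) with hch
  obtain ⟨usA, hA⟩ := lastA chains hne [] 1
  obtain ⟨usB, hB⟩ := lastB chains hne [] 1
  have hperm := permFold chains [1] [1] (List.Perm.refl _)
  simp only [List.nil_append] at hA hB
  rw [hA, hB, List.dropLast_concat, List.dropLast_concat]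
  rw [hA, hB] at hperm
  exact pv_perm_cancel_last hperm

-- ---------- A's powerset loop: proof-side mirror and its hash-set semantics ----------

def powersetPort (s : List Int) : List (List Int) :=
  (PySem.List.pyRange 1 ((s.length : Int) + 1)).flatMap
    (fun r => PySem.List.combinations s r.toNat)

theorem mem_powersetPort {s nps : List Int} :
    nps ∈ powersetPort s ↔ nps.Sublist s ∧ nps ≠ [] := by
  unfold powersetPort
  simp only [List.mem_flatMap, PySem.List.mem_pyRange_one, PySem.List.mem_combinations_iff]
  constructor
  · rintro ⟨r, ⟨hr1, _⟩, hsub, hlen⟩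
    refine ⟨hsub, ?_⟩
    intro hnil
    subst hnil
    simp at hlen
    omega
  · rintro ⟨hsub, hne⟩
    refine ⟨(nps.length : Int), ⟨?_, ?_⟩, hsub, by simp⟩
    · have : nps.length ≠ 0 := fun h => hne (List.eq_nil_of_length_eq_zero h)
      omega
    · have := hsub.length_le
      omega

-- "y is a sum of a nonempty sublist of l"
def pvRep (l : List Int) (y : Int) : Prop := ∃ s : List Int, s.Sublist l ∧ s ≠ [] ∧ s.sum = y

theorem pvRep_of_perm {l₁ l₂ : List Int} (h : l₁.Perm l₂) {y : Int} :
    pvRep l₁ y → pvRep l₂ y := by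
  rintro ⟨s, hs, hne, hsum⟩
  obtain ⟨t, htp, hts⟩ := hs.subperm.trans h.subperm
  refine ⟨t, hts, ?_, by rw [htp.sum_eq]; exact hsum⟩
  intro hnil
  subst hnil
  exact hne (List.eq_nil_of_length_eq_zero (by simpa using htp.length_eq.symm))

theorem pv_nodup_toList (m : Std.HashSet Int) : m.toList.Nodup :=
  (Std.HashSet.distinct_toList (m := m)).imp (by intro a b hab; simpa using hab)

theorem pv_sub_finset {x : Int} (found : List Int) (hb : ∀ y ∈ found, 1 ≤ y ∧ y < x) :
    found.toFinset ⊆ Finset.Icc 1 (x - 1) := by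
  intro y hy
  rw [List.mem_toFinset] at hy
  have := hb y hy
  simp only [Finset.mem_Icc]
  omega

theorem pv_len_le {x : Int} (hx : 2 ≤ x) (found : Std.HashSet Int)
    (hb : ∀ y ∈ found, 1 ≤ y ∧ y < x) : (found.size : Int) ≤ x - 1 := by
  have hnd := pv_nodup_toList found
  have h1 : found.toList.toFinset.card = found.toList.length := List.toFinset_card_of_nodup hnd
  have h2 := Finset.card_le_card
    (pv_sub_finset found.toList (fun y hy => hb y (Std.HashSet.mem_toList.1 hy)))
  rw [h1, Int.card_Icc, Std.HashSet.length_toList] at h2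
  omega

theorem pv_cover {x : Int} (hx : 2 ≤ x) (found : Std.HashSet Int)
    (hb : ∀ y ∈ found, 1 ≤ y ∧ y < x) :
    ((found.size : Int) = x - 1) ↔ ∀ y : Int, 1 ≤ y → y < x → y ∈ found := by
  have hnd := pv_nodup_toList found
  have h1 : found.toList.toFinset.card = found.toList.length := List.toFinset_card_of_nodup hnd
  have hsub := pv_sub_finset found.toList (fun y hy => hb y (Std.HashSet.mem_toList.1 hy))
  have hcard : (Finset.Icc (1:Int) (x - 1)).card = (x - 1).toNat := by
    rw [Int.card_Icc]; congr 1; omega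
  rw [← Std.HashSet.length_toList (m := found)]
  constructor
  · intro hlen y hy1 hy2
    have heq : found.toList.toFinset = Finset.Icc 1 (x - 1) := by
      apply Finset.eq_of_subset_of_card_le hsub
      rw [hcard, h1]; omega
    have : y ∈ found.toList.toFinset := by
      rw [heq]; simp only [Finset.mem_Icc]; omega
    exact Std.HashSet.mem_toList.1 (List.mem_toFinset.1 this)
  · intro hall
    have hsup : Finset.Icc (1:Int) (x - 1) ⊆ found.toList.toFinset := by
      intro y hy
      simp only [Finset.mem_Icc] at hy
      exact List.mem_toFinset.2 (Std.HashSet.mem_toList.2 (hall y hy.1 (by omega)))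
    have heq := Finset.Subset.antisymm hsub hsup
    have : found.toList.toFinset.card = (x - 1).toNat := by rw [heq, hcard]
    omega

theorem pv_mem_insert (found : Std.HashSet Int) (v y : Int) :
    y ∈ found.insert v ↔ y ∈ found ∨ y = v := by
  rw [Std.HashSet.mem_insert]
  constructor
  · rintro (h | h)
    · have hvy : v = y := by simpa using h
      exact Or.inr hvy.symm
    · exact Or.inl h
  · rintro (h | rfl)
    · exact Or.inr h
    · exact Or.inl (by simp)

theorem stepA_of_ge {x : Int} {found : Std.HashSet Int}
    (h : ¬ ((found.size : Int) < x - 1)) (y : Int) : stepA x found y = found := by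
  simp [stepA, h]

theorem foldl_stepA_of_ge {x : Int} (ys : List Int) {found : Std.HashSet Int}
    (h : ¬ ((found.size : Int) < x - 1)) : ys.foldl (stepA x) found = found := by
  induction ys with
  | nil => rfl
  | cons y rest ih => rw [List.foldl_cons, stepA_of_ge h y]; exact ih

theorem combFold_eq (x : Int) (s : List Int) (r : Nat) (pre : Int) (found : Std.HashSet Int) :
    combFold x s r pre found =
      ((PySem.List.combinations s r).map (fun c => pre + c.sum)).foldl (stepA x) found := by
  fun_induction combFold with
  | case1 s r pre found h => exact (foldl_stepA_of_ge _ h).symm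
  | case2 a b c d =>
    rw [PySem.List.combinations_zero]
    simp [stepA]
  | case3 a b c d =>
    rw [PySem.List.combinations_nil_succ]
    rfl
  | case4 a b c d e f ih1 ih2 =>
    rw [PySem.List.combinations_cons_succ, List.map_append, List.foldl_append, List.map_map]
    rw [ih2, ih1]
    congr 2
    apply List.map_congr_left
    intro c _
    simp [Function.comp, add_assoc]

theorem foldA_top (x : Int) (f : List Int) :
    (PySem.List.pyRange 1 ((f.length : Int) + 1)).foldl
        (fun fd r => combFold x f r.toNat 0 fd) ∅ =
      ((powersetPort f).map List.sum).foldl (stepA x) ∅ := by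
  have aux : ∀ (rs : List Int) (found : Std.HashSet Int),
      rs.foldl (fun fd r => combFold x f r.toNat 0 fd) found =
        ((rs.flatMap (fun r => PySem.List.combinations f r.toNat)).map List.sum).foldl
          (stepA x) found := by
    intro rs
    induction rs with
    | nil => intro found; rfl
    | cons r rest ih =>
      intro found
      rw [List.foldl_cons, combFold_eq, List.flatMap_cons, List.map_append, List.foldl_append]
      simp only [zero_add]
      exact ih _
  unfold powersetPort
  exact aux _ _

theorem stepA_fold_size_eq {x : Int} (hx : 2 ≤ x) (ys : List Int) (found : Std.HashSet Int)
    (hb : ∀ y ∈ found, 1 ≤ y ∧ y < x) :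
    (((ys.foldl (stepA x) found).size : Int) = x - 1) ↔
      (∀ y : Int, 1 ≤ y → y < x → (y ∈ found ∨ y ∈ ys)) := by
  induction ys generalizing found with
  | nil =>
    simp only [List.foldl_nil, List.not_mem_nil, or_false]
    exact pv_cover hx found hb
  | cons y0 rest ih =>
    rw [List.foldl_cons]
    by_cases h : (found.size : Int) < x - 1
    · rw [show stepA x found y0 = if 1 ≤ y0 ∧ y0 < x then found.insert y0 else found from
        by simp [stepA, h]]
      by_cases hc : 1 ≤ y0 ∧ y0 < x
      · rw [if_pos hc]
        rw [ih (found.insert y0)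
          (by intro y hy; rcases (pv_mem_insert found _ y).1 hy with hy | rfl
              · exact hb y hy
              · exact hc)]
        constructor
        · intro hall y hy1 hy2
          rcases hall y hy1 hy2 with hy | hy
          · rcases (pv_mem_insert found _ y).1 hy with hy | rfl
            · exact Or.inl hy
            · exact Or.inr List.mem_cons_self
          · exact Or.inr (List.mem_cons_of_mem _ hy)
        · intro hall y hy1 hy2
          rcases hall y hy1 hy2 with hy | hy
          · exact Or.inl ((pv_mem_insert found _ y).2 (Or.inl hy))
          · rcases List.mem_cons.1 hy with rfl | hy
            · exact Or.inl ((pv_mem_insert found _ y).2 (Or.inr rfl))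
            · exact Or.inr hy
      · rw [if_neg hc]
        rw [ih found hb]
        constructor
        · intro hall y hy1 hy2
          rcases hall y hy1 hy2 with hy | hy
          · exact Or.inl hy
          · exact Or.inr (List.mem_cons_of_mem _ hy)
        · intro hall y hy1 hy2
          rcases hall y hy1 hy2 with hy | hy
          · exact Or.inl hy
          · rcases List.mem_cons.1 hy with rfl | hy
            · exact absurd ⟨by omega, by omega⟩ hc
            · exact Or.inr hy
    · rw [stepA_of_ge h, foldl_stepA_of_ge rest h]
      have hle := pv_len_le hx found hb
      have hlen : ((found.size : Int)) = x - 1 := by omega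
      rw [hlen]
      simp only [true_iff]
      intro y hy1 hy2
      exact Or.inl ((pv_cover hx found hb).1 hlen y hy1 hy2)

-- ---------- B's bitset sweep: bit y of the mask = "y is a subset sum" ----------

theorem dp_testBit {l : List Int} (hl : ∀ d ∈ l, 1 ≤ d) (m : Nat) (y : Nat) :
    (l.foldl (fun m d => m ||| (m <<< d.toNat)) m).testBit y ↔
      ∃ s : List Int, s.Sublist l ∧ ∃ j : Nat, m.testBit j ∧ (j : Int) + s.sum = (y : Int) := by
  induction l generalizing m y with
  | nil =>
    simp only [List.foldl_nil, List.sublist_nil]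
    constructor
    · intro h
      exact ⟨[], rfl, y, h, by simp⟩
    · rintro ⟨s, rfl, j, hj, hsum⟩
      simp at hsum
      have : j = y := by exact_mod_cast hsum
      subst this; exact hj
  | cons d l ih =>
    have hd : (1:Int) ≤ d := hl d List.mem_cons_self
    have hl' : ∀ a ∈ l, (1:Int) ≤ a := fun a ha => hl a (List.mem_cons_of_mem _ ha)
    simp only [List.foldl_cons]
    rw [ih hl']
    constructor
    · rintro ⟨s, hs, j, hj, hsum⟩
      rw [Nat.testBit_or] at hj
      rcases Bool.or_eq_true_iff.1 hj with hj | hj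
      · exact ⟨s, hs.cons _, j, hj, hsum⟩
      · rw [Nat.testBit_shiftLeft] at hj
        rcases Bool.and_eq_true_iff.1 hj with ⟨hge, hbit⟩
        have hge' : d.toNat ≤ j := by simpa using of_decide_eq_true hge
        refine ⟨d :: s, (List.cons_sublist_cons).2 hs, j - d.toNat, hbit, ?_⟩
        have hcast : ((d.toNat : Int)) = d := Int.toNat_of_nonneg (by omega)
        push_cast [Nat.cast_sub hge']
        rw [hcast] at *
        simp only [List.sum_cons]
        omega
    · rintro ⟨s, hs, j, hj, hsum⟩
      rcases List.sublist_cons_iff.1 hs with hs | ⟨t, rfl, ht⟩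
      · exact ⟨s, hs, j, by rw [Nat.testBit_or, hj]; simp, hsum⟩
      · refine ⟨t, ht, j + d.toNat, ?_, ?_⟩
        · rw [Nat.testBit_or]
          have : (m <<< d.toNat).testBit (j + d.toNat) = true := by
            rw [Nat.testBit_shiftLeft]
            simp [hj]
          rw [this]; simp
        · have hcast : ((d.toNat : Int)) = d := Int.toNat_of_nonneg (by omega)
          push_cast
          rw [hcast]
          simp only [List.sum_cons] at hsum
          omega

theorem pv_testBit_one (j : Nat) : (1 : Nat).testBit j = decide (j = 0) := by
  cases j with
  | zero => rfl
  | succ j => simp [Nat.testBit_succ]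

theorem pv_and_mask {a k : Nat} :
    (a &&& (2 ^ k - 1) = 2 ^ k - 1) ↔ ∀ i, i < k → a.testBit i = true := by
  constructor
  · intro h i hi
    have := congrArg (fun n => n.testBit i) h
    simp only [Nat.testBit_and, Nat.testBit_two_pow_sub_one] at this
    rw [decide_eq_true hi] at this
    simpa using this
  · intro h
    apply Nat.eq_of_testBit_eq
    intro i
    simp only [Nat.testBit_and, Nat.testBit_two_pow_sub_one]
    by_cases hi : i < k
    · simp [h i hi, hi]
    · simp [hi]

theorem bitset_check {x : Int} (hx : 2 ≤ x) (f : List Int) (hf : ∀ d ∈ f, 1 ≤ d) :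
    ((((f.foldl (fun m d => m ||| (m <<< d.toNat)) 1) >>> 1) &&& ((1 <<< (x - 1).toNat) - 1)
        == ((1 <<< (x - 1).toNat) - 1)) = true) ↔
      ∀ y : Int, 1 ≤ y → y < x → pvRep f y := by
  rw [beq_iff_eq, Nat.one_shiftLeft, pv_and_mask]
  constructor
  · intro h y hy1 hy2
    have hyn : (y - 1).toNat < (x - 1).toNat := by omega
    have := h (y - 1).toNat hyn
    rw [Nat.testBit_shiftRight] at this
    rw [dp_testBit hf] at this
    obtain ⟨s, hs, j, hj, hsum⟩ := this
    rw [pv_testBit_one] at hj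
    have hj0 : j = 0 := by simpa using hj
    subst hj0
    have hcast : ((1 + (y - 1).toNat : Nat) : Int) = y := by push_cast; omega
    rw [hcast] at hsum
    refine ⟨s, hs, ?_, by simpa using hsum⟩
    intro hnil; subst hnil; simp at hsum; omega
  · intro h i hi
    rw [Nat.testBit_shiftRight, dp_testBit hf]
    have hy1 : (1:Int) ≤ ((1 + i : Nat) : Int) := by push_cast; omega
    have hy2 : ((1 + i : Nat) : Int) < x := by push_cast; omega
    obtain ⟨s, hs, hne, hsum⟩ := h _ hy1 hy2
    exact ⟨s, hs, 0, by rw [pv_testBit_one]; simp, by simpa using hsum⟩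

theorem factorsPort_nonpos {x : Int} (h : x ≤ 1) : factorsPort x = [] := by
  have hpp : ppLoop x.toNat 0 x [] = ([], x) := by
    cases hxt : x.toNat with
    | zero => rfl
    | succ m =>
      simp only [ppLoop]
      rw [if_neg (by show ¬ wheelCand 0 * wheelCand 0 ≤ x
                     rw [show wheelCand 0 = 2 from rfl]; omega)]
  unfold factorsPort primePowersPort
  rw [hpp]
  rw [if_neg (by omega : ¬ (1:Int) < x)]
  simp

-- the main branch: both tests decide "every value in [1,x) is a proper-divisor subset sum"
theorem main_branch {x : Int} (hx : 2 ≤ x) :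
    ((((PySem.List.pyRange 1
          (((PySem.List.sorted (factorsPort x) (fun a => a) true).length : Int) + 1)).foldl
        (fun fd r => combFold x (PySem.List.sorted (factorsPort x) (fun a => a) true) r.toNat 0 fd)
        ∅).size : Int) == x - 1) =
    ((((factorsB x).foldl (fun m d => m ||| (m <<< d.toNat)) 1) >>> 1)
        &&& ((1 <<< (x - 1).toNat) - 1) == ((1 <<< (x - 1).toNat) - 1)) := by
  have hperm : (PySem.List.sorted (factorsPort x) (fun a => a) true).Perm (factorsB x) :=
    (PySem.List.sorted_perm _ _ _).trans (factors_perm hx)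
  have hposB : ∀ d ∈ factorsB x, 1 ≤ d := by
    intro d hd
    exact factorsPort_pos x d ((factors_perm hx).mem_iff.mpr hd)
  rw [Bool.eq_iff_iff, beq_iff_eq, foldA_top]
  rw [stepA_fold_size_eq hx _ ∅ (by intro y hy; exact absurd hy (Std.HashSet.not_mem_empty))]
  rw [bitset_check hx _ hposB]
  constructor
  · intro h y hy1 hy2
    rcases h y hy1 hy2 with hmem | hy
    · exact absurd hmem (Std.HashSet.not_mem_empty)
    · obtain ⟨nps, hnps, hsum⟩ := List.mem_map.1 hy
      obtain ⟨hsub, hne⟩ := mem_powersetPort.1 hnps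
      exact pvRep_of_perm hperm ⟨nps, hsub, hne, hsum⟩
  · intro h y hy1 hy2
    obtain ⟨s, hs, hne, hsum⟩ := pvRep_of_perm hperm.symm (h y hy1 hy2)
    exact Or.inr (List.mem_map.2 ⟨s, mem_powersetPort.2 ⟨hs, hne⟩, hsum⟩)

theorem isPractical_spec' (x : Int) : isPractical x = isPractical_alt x := by
  by_cases hlt : x < 1
  · have hB : isPractical_alt x = false := by
      unfold isPractical_alt
      rw [if_pos hlt]
    rw [hB]
    simp only [isPractical]
    split_ifs with h1 h2 h3 h4
    · rw [beq_iff_eq] at h1; omega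
    · rfl
    · rfl
    · rfl
    · have hf : factorsPort x = [] := factorsPort_nonpos (by omega)
      rw [hf]
      have hfold : (PySem.List.pyRange 1
            (((PySem.List.sorted ([] : List Int) (fun a => a) true).length : Int) + 1)).foldl
          (fun fd r => combFold x (PySem.List.sorted ([] : List Int) (fun a => a) true) r.toNat 0 fd)
          (∅ : Std.HashSet Int) = ∅ := rfl
      rw [hfold]
      simp only [Std.HashSet.size_empty, Nat.cast_zero]
      simp only [beq_eq_false_iff_ne, ne_eq]
      omega
  · by_cases h1 : x = 1
    · subst h1
      decide
    · have hx2 : 2 ≤ x := by omega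
      have hsum2 : (factorsB x).sum = (PySem.List.sorted (factorsPort x) (fun a => a) true).sum := by
        rw [(PySem.List.sorted_perm (factorsPort x) (fun a => a) true).sum_eq]
        exact ((factors_perm hx2).sum_eq).symm
      simp only [isPractical, isPractical_alt, hsum2]
      rw [if_neg hlt]
      split_ifs with g1 g2 g3 g4
      · rfl
      · rfl
      · rfl
      · rfl
      · exact main_branch hx2

-- ===== VERDICT (by name: the statement is the Claim_ definition above) =====
theorem isPractical_spec : Claim_equal_isPractical := by
  intro x _
  unfold Spec_isPractical
  exact isPractical_spec' x
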